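-- pv_equiv track=rewrite | github.com/dhqxdhqx/piano_project | pythonProject/main_branch.py | encrypt_password
-- ===== SOURCE A (Python) =====
-- def encrypt_password(text):
--     """
--     Function to encrypt/hash password
--     """
--     result = ""
--     for char in text:
--         # Encrypt uppercase characters in plain text
--         if ord(char) > 75:
--             if ord(char) % 3 == 0:
--                 ord_char = (ord(char) - 12)
--             else:
--                 ord_char = (ord(char) - 21)
--         else:
--             if ord(char) % 4 == 0:
--                 ord_char = (ord(char) + 7)
--             else:
--                 ord_char = (ord(char) + 18)
--
--         result += chr(ord_char)
--     return result
-- ===== SOURCE B (Python) =====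
-- def encrypt_password(text):
--     """
--     Function to encrypt/hash password.
--     Divide-and-conquer: encrypt each half independently and concatenate;
--     a single character is shifted by the rule's delta.
--     """
--     n = len(text)
--     if n == 0:
--         return ""
--     if n == 1:
--         o = ord(text)
--         if o > 75:
--             delta = -12 if o % 3 == 0 else -21
--         else:
--             delta = 7 if o % 4 == 0 else 18
--         return chr(o + delta)
--     mid = n // 2
--     return encrypt_password(text[:mid]) + encrypt_password(text[mid:])
-- ===== Notes on version B (the rewrite author's own statement) =====
-- stated objective: alternative
-- what changed: Replaces the left-to-right accumulate-into-a-string loop with a divide-and-conquer recursion that splits the text in half, encrypts each half independently, and concatenates the results; the base case shifts one character by a signed delta.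
import Mathlib
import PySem

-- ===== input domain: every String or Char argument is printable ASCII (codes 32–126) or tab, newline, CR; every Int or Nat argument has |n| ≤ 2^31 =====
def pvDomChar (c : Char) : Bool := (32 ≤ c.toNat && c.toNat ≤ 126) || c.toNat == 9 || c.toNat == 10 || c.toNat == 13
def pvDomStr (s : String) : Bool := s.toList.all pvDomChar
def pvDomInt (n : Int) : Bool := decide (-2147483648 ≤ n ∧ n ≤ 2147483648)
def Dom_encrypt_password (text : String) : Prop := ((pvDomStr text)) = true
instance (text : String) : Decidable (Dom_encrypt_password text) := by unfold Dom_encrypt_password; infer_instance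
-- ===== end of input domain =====

-- B replaces A's left-to-right accumulator loop with a divide-and-conquer recursion
-- (encrypt the two halves independently and concatenate); objective: alternative.

-- ===== PORT A =====
def encrypt_password (text : String) : String :=
  text.toList.foldl (fun result char =>
    let o : Int := char.toNat
    let ord_char : Int :=
      if o > 75 then
        if PySem.Int.mod o 3 == 0 then o - 12 else o - 21
      else
        if PySem.Int.mod o 4 == 0 then o + 7 else o + 18
    result ++ String.ofList [Char.ofNat ord_char.toNat]) ""

-- ===== PORT B =====
def epDelta (o : Int) : Int :=
  if o > 75 then
    if PySem.Int.mod o 3 == 0 then -12 else -21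
  else
    if PySem.Int.mod o 4 == 0 then 7 else 18

-- divide-and-conquer on the character list; text[:mid]/text[mid:] with 0 ≤ mid ≤ n
-- are exactly List.take mid / List.drop mid
def epRec (l : List Char) : List Char :=
  match h : l with
  | [] => []
  | [c] => [Char.ofNat ((c.toNat : Int) + epDelta (c.toNat : Int)).toNat]
  | a :: b :: rest =>
    let mid := l.length / 2
    epRec (l.take mid) ++ epRec (l.drop mid)
termination_by l.length
decreasing_by
  · simp [h]; omega
  · simp [h]; omega

def encrypt_password_alt (text : String) : String :=
  String.ofList (epRec text.toList)

-- ===== PRECONDITION & SPEC =====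
def Spec_encrypt_password (text : String) (out : String) : Prop := out = encrypt_password_alt text
instance (text : String) (out : String) : Decidable (Spec_encrypt_password text out) := by unfold Spec_encrypt_password; infer_instance

-- ===== CLAIM (what is proved, stated in full; the proofs are below) =====
def Claim_equal_encrypt_password : Prop := ∀ (text : String), Dom_encrypt_password text → Spec_encrypt_password text (encrypt_password text)

-- ===== LEMMAS AND PROOFS =====

def epChar (c : Char) : Char := Char.ofNat ((c.toNat : Int) + epDelta (c.toNat : Int)).toNat

theorem epRec_eq_map (l : List Char) : epRec l = l.map epChar := by
  induction l using epRec.induct with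
  | case1 => simp [epRec]
  | case2 c => simp [epRec, epChar]
  | case3 a b rest mid ih1 ih2 =>
    rw [epRec]
    rw [ih1, ih2, ← List.map_append, List.take_append_drop]

theorem foldl_append_mk (g : Char → Char) (l : List Char) (acc : List Char) :
    l.foldl (fun r c => r ++ String.ofList [g c]) (String.ofList acc) = String.ofList (acc ++ l.map g) := by
  induction l generalizing acc with
  | nil => simp
  | cons a rest ih =>
    simp only [List.foldl_cons]
    have h1 : String.ofList acc ++ String.ofList [g a] = String.ofList (acc ++ [g a]) := by simp
    rw [h1, ih]
    simp

theorem a_step_eq_epChar (c : Char) :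
    Char.ofNat ((if (c.toNat : Int) > 75 then
        if PySem.Int.mod (c.toNat : Int) 3 == 0 then (c.toNat : Int) - 12 else (c.toNat : Int) - 21
      else
        if PySem.Int.mod (c.toNat : Int) 4 == 0 then (c.toNat : Int) + 7 else (c.toNat : Int) + 18)).toNat
    = epChar c := by
  unfold epChar epDelta
  split_ifs <;> norm_num <;> ring_nf

-- ===== VERDICT (by name: the statement is the Claim_ definition above) =====
theorem encrypt_password_spec : Claim_equal_encrypt_password := by
  intro text _
  unfold Spec_encrypt_password encrypt_password encrypt_password_alt
  rw [epRec_eq_map]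
  have hfun : (fun (result : String) (char : Char) =>
      result ++ String.ofList [Char.ofNat
        ((if (char.toNat : Int) > 75 then
            if PySem.Int.mod (char.toNat : Int) 3 == 0 then (char.toNat : Int) - 12 else (char.toNat : Int) - 21
          else
            if PySem.Int.mod (char.toNat : Int) 4 == 0 then (char.toNat : Int) + 7 else (char.toNat : Int) + 18)).toNat]) =
      (fun (r : String) (c : Char) => r ++ String.ofList [epChar c]) := by
    funext r c
    rw [a_step_eq_epChar]
  rw [hfun, show ("" : String) = String.ofList [] from rfl, foldl_append_mk]
  simp
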